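-- pv_equiv track=rewrite | github.com/pypi-data/pypi-mirror-173 | packages/iutils/iutils-0.0.34-py3-none-any.whl/pcolrm/commands.py | get_column_markers
-- ===== SOURCE A (Python) =====
-- def get_column_markers(line, delimiter):
--     column_marker = []
--
--     skip_delimiter = False
--     skip_non_delimiter = False
--     for idx, val in enumerate(line):
--         if not skip_delimiter and not skip_non_delimiter:
--             column_marker.append(idx)
--             if val == delimiter:
--                 skip_delimiter = True
--             else:
--                 skip_non_delimiter = True
--             continue
--
--         if val == delimiter:
--             if skip_delimiter and not skip_non_delimiter:
--                 continue
--             if not skip_delimiter and skip_non_delimiter: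
--                 skip_delimiter = True
--                 skip_non_delimiter = False
--                 continue
--         else:
--             if skip_delimiter and not skip_non_delimiter:
--                 column_marker.append(idx)
--                 skip_delimiter = False
--                 skip_non_delimiter = True
--                 continue
--             if not skip_delimiter and skip_non_delimiter:
--                 continue
--
--     if column_marker[0] != 0:
--         column_marker.insert(0, 0)
--
--     return column_marker
-- ===== SOURCE B (Python) =====
-- def get_column_markers(line, delimiter):
--     # Stage 1: run-length encode the line by is-delimiter classification.
--     runs = []  # list of (is_delimiter, run_length)
--     for ch in line:
--         d = (ch == delimiter)
--         if runs and runs[-1][0] == d: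
--             runs[-1] = (d, runs[-1][1] + 1)
--         else:
--             runs.append((d, 1))
--     # Stage 2: prefix-sum the run lengths; keep starts of non-delimiter runs.
--     markers, pos = [], 0
--     for d, n in runs:
--         if not d:
--             markers.append(pos)
--         pos += n
--     # A line starting with delimiters still gets a leading 0 marker.
--     if not markers or markers[0] != 0:
--         markers.insert(0, 0)
--     return markers
-- ===== Notes on version B (the rewrite author's own statement) =====
-- stated objective: alternative
-- what changed: Replaced the single-pass two-boolean state machine with a staged pipeline: first run-length encode the line by is-delimiter classification, then prefix-sum the run lengths and keep the start offsets of the non-delimiter runs, finally prepend 0 if missing.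
import Mathlib
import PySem

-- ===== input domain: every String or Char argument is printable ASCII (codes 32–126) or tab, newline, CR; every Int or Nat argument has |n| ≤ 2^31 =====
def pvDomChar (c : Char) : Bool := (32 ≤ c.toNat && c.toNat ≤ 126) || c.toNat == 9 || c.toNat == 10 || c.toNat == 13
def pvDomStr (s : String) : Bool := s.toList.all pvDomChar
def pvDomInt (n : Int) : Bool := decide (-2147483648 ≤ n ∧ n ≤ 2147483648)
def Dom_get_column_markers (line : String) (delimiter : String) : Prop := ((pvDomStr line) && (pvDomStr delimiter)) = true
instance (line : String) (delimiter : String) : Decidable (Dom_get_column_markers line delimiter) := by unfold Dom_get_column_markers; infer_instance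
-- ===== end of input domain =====

-- B replaces A's one-pass two-boolean state machine by a staged pipeline (run-length encode, then prefix-sum the run lengths keeping non-delimiter run starts); on the empty line A raises IndexError (excluded by Pre_) while B returns [0].


-- ===== PORT A =====
-- Python's `val == delimiter`: val is the one-character string line[idx], delimiter any string
def isDelim (d : String) (c : Char) : Bool := String.ofList [c] == d

-- the for-loop of A, state = (idx, skip_delimiter, skip_non_delimiter, column_marker), branches in A's order
def goA (d : String) : List Char → Nat → Bool → Bool → List Int → List Int
  | [], _, _, _, acc => acc
  | c :: rest, idx, skipD, skipN, acc =>
    if !skipD && !skipN then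
      let acc' := acc ++ [(idx : Int)]
      if isDelim d c then goA d rest (idx+1) true skipN acc'
      else goA d rest (idx+1) skipD true acc'
    else if isDelim d c then
      if skipD && !skipN then goA d rest (idx+1) skipD skipN acc
      else if !skipD && skipN then goA d rest (idx+1) true false acc
      else goA d rest (idx+1) skipD skipN acc
    else
      if skipD && !skipN then goA d rest (idx+1) false true (acc ++ [(idx : Int)])
      else if !skipD && skipN then goA d rest (idx+1) skipD skipN acc
      else goA d rest (idx+1) skipD skipN acc

def get_column_markers (line : String) (delimiter : String) : List Int :=
  let m := goA delimiter line.toList 0 false false []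
  -- `if column_marker[0] != 0`: Python raises IndexError on the empty line, excluded by Pre_; on nonempty lines m is nonempty and headD is exact
  if m.headD 0 ≠ 0 then 0 :: m else m

-- ===== PORT B =====
-- stage 1 of Source B: run-length encode the line (runs[-1] mutation = dropLast ++ updated last)
def buildRuns (d : String) : List Char → List (Bool × Nat) → List (Bool × Nat)
  | [], runs => runs
  | c :: rest, runs =>
    let b := isDelim d c
    match runs.getLast? with
    | some last =>
        if last.1 == b then buildRuns d rest (runs.dropLast ++ [(b, last.2 + 1)])
        else buildRuns d rest (runs ++ [(b, 1)])
    | none => buildRuns d rest (runs ++ [(b, 1)])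

-- stage 2 of Source B: prefix-sum the run lengths, keeping the start of each non-delimiter run
def scanRuns : List (Bool × Nat) → Nat → List Int
  | [], _ => []
  | (d, n) :: rest, pos =>
    if !d then (pos : Int) :: scanRuns rest (pos + n) else scanRuns rest (pos + n)

-- final fixup of Source B: `if not markers or markers[0] != 0: markers.insert(0, 0)` (headD is exact on the nonempty case)
def fixLeading (markers : List Int) : List Int :=
  if markers.isEmpty || markers.headD 0 != 0 then 0 :: markers else markers

def get_column_markers_alt (line : String) (delimiter : String) : List Int :=
  fixLeading (scanRuns (buildRuns delimiter line.toList []) 0)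

-- ===== PRECONDITION & SPEC =====
-- Pre_ excludes only the empty line, on which Python A raises IndexError (column_marker[0] on an empty list)
def Pre_get_column_markers (line : String) (delimiter : String) : Prop := line ≠ ""
instance (line : String) (delimiter : String) : Decidable (Pre_get_column_markers line delimiter) := by unfold Pre_get_column_markers; infer_instance
def pvWitness_get_column_markers : String × String := ("a  bc d", " ")

def Spec_get_column_markers (line : String) (delimiter : String) (out : List Int) : Prop := out = get_column_markers_alt line delimiter
instance (line : String) (delimiter : String) (out : List Int) : Decidable (Spec_get_column_markers line delimiter out) := by unfold Spec_get_column_markers; infer_instance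

-- ===== CLAIM (what is proved, stated in full; the proofs are below) =====
def Claim_equal_get_column_markers : Prop := ∀ (line : String) (delimiter : String), Dom_get_column_markers line delimiter → Pre_get_column_markers line delimiter → Spec_get_column_markers line delimiter (get_column_markers line delimiter)

-- ===== LEMMAS AND PROOFS =====

-- canonical middle form: look-back markers of `l`, previous character's is-delimiter flag `p`, indices from `idx`
def goB (d : String) : Bool → List Char → Nat → List Int
  | _, [], _ => []
  | p, c :: rest, idx =>
    if !(isDelim d c) && p then (idx : Int) :: goB d (isDelim d c) rest (idx+1)
    else goB d (isDelim d c) rest (idx+1)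

def totalLen (rs : List (Bool × Nat)) : Nat := (rs.map Prod.snd).sum

theorem goA_eq_goB (d : String) (rest : List Char) : ∀ (p : Bool) (idx : Nat) (acc : List Int),
    goA d rest idx p (!p) acc = acc ++ goB d p rest idx := by
  induction rest with
  | nil => intro p idx acc; simp [goA, goB]
  | cons c rest ih =>
    intro p idx acc
    by_cases hp : p = true <;> by_cases hc : isDelim d c = true <;>
      simp [goA, goB, hp, hc] <;>
        first
          | simpa [hc] using ih (isDelim d c) (idx+1) acc
          | simpa [hc] using ih (isDelim d c) (idx+1) (acc ++ [(idx : Int)])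

theorem scanRuns_append (ys : List (Bool × Nat)) : ∀ (xs : List (Bool × Nat)) (pos : Nat),
    scanRuns (xs ++ ys) pos = scanRuns xs pos ++ scanRuns ys (pos + totalLen xs) := by
  intro xs
  induction xs with
  | nil => intro pos; simp [scanRuns, totalLen]
  | cons x xs ih =>
    intro pos
    obtain ⟨b, n⟩ := x
    by_cases hb : b = true <;>
      · simp only [List.cons_append, scanRuns, hb, Bool.not_true, Bool.not_false,
          if_pos, if_neg, Bool.false_eq_true, not_false_eq_true, 
          List.cons_append, totalLen, List.map_cons, List.sum_cons]
        rw [ih (pos + n)]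
        have h4 : pos + n + (xs.map Prod.snd).sum = pos + (n + (xs.map Prod.snd).sum) := by
          omega
        rw [totalLen, h4]

theorem buildRuns_scan (d : String) (l : List Char) :
    ∀ (rs : List (Bool × Nat)) (b : Bool) (n : Nat) (pos : Nat),
    scanRuns (buildRuns d l (rs ++ [(b, n)])) pos =
      scanRuns (rs ++ [(b, n)]) pos ++ goB d b l (pos + totalLen rs + n) := by
  induction l with
  | nil => intro rs b n pos; simp [buildRuns, goB]
  | cons c rest ih =>
    intro rs b n pos
    rw [buildRuns]
    simp only [List.getLast?_concat, List.dropLast_concat]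
    by_cases hc : isDelim d c = b
    · -- same run: extend the last run's length
      simp only [hc, BEq.rfl, if_pos]
      rw [ih rs b (n + 1) pos]
      have h1 : scanRuns (rs ++ [(b, n + 1)]) pos = scanRuns (rs ++ [(b, n)]) pos := by
        rw [scanRuns_append, scanRuns_append]
        cases b <;> simp [scanRuns]
      rw [h1]
      have h2 : goB d b (c :: rest) (pos + totalLen rs + n) =
          goB d b rest (pos + totalLen rs + n + 1) := by
        rw [goB]
        cases b <;> simp [hc]
      rw [h2]
      have h3 : pos + totalLen rs + (n + 1) = pos + totalLen rs + n + 1 := by omega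
      rw [h3]
    · -- new run starts
      have hbeq : (b == isDelim d c) = false := by
        cases hb : b <;> cases hdc : isDelim d c <;> simp_all
      simp only [hbeq, Bool.false_eq_true, if_neg, not_false_eq_true]
      have htot : totalLen (rs ++ [(b, n)]) = totalLen rs + n := by simp [totalLen]
      have e1 : pos + totalLen (rs ++ [(b, n)]) = pos + totalLen rs + n := by
        rw [htot]; omega
      rw [ih (rs ++ [(b, n)]) (isDelim d c) 1 pos, scanRuns_append, e1, List.append_assoc]
      congr 1
      rw [goB]
      cases hb : b <;> cases hdc : isDelim d c <;> simp_all [scanRuns]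

theorem goB_mem_le (d : String) (l : List Char) : ∀ (p : Bool) (idx : Nat) (x : Int),
    x ∈ goB d p l idx → (idx : Int) ≤ x := by
  induction l with
  | nil => intro p idx x h; simp [goB] at h
  | cons c rest ih =>
    intro p idx x h
    rw [goB] at h
    split at h
    · rcases List.mem_cons.mp h with h | h
      · omega
      · have := ih (isDelim d c) (idx + 1) x h; push_cast at this ⊢; omega
    · have := ih (isDelim d c) (idx + 1) x h; push_cast at this ⊢; omega

theorem alt_eq (line d : String) (c : Char) (cs : List Char) (h : line.toList = c :: cs) :
    get_column_markers_alt line d = 0 :: goB d (isDelim d c) cs 1 := by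
  unfold get_column_markers_alt fixLeading
  rw [h]
  have hbuild : buildRuns d (c :: cs) [] = buildRuns d cs ([] ++ [(isDelim d c, 1)]) := by
    rw [buildRuns]; simp
  rw [hbuild, buildRuns_scan d cs [] (isDelim d c) 1 0]
  have hm : scanRuns ([] ++ [(isDelim d c, 1)]) 0 =
      if isDelim d c then [] else [(0 : Int)] := by
    cases hdc : isDelim d c <;> simp [scanRuns]
  cases hdc : isDelim d c
  · -- first char non-delimiter: marker list starts with 0, no insertion
    rw [hdc] at hm; simp only [hm]
    simp [totalLen]
  · -- first char delimiter: all markers ≥ 1 (or none), so 0 is inserted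
    rw [hdc] at hm; simp only [hm, if_pos]
    simp only [totalLen, List.map_nil, List.sum_nil, Nat.zero_add, List.nil_append]
    cases hg : goB d true cs 1 with
    | nil => simp
    | cons y ys =>
      have hy : (1 : Int) ≤ y := goB_mem_le d cs true 1 y (by rw [hg]; exact List.mem_cons_self)
      simp
      omega

-- ===== VERDICT (by name: the statement is the Claim_ definition above) =====
theorem get_column_markers_spec : Claim_equal_get_column_markers := by
  intro line d _ hpre
  unfold Spec_get_column_markers
  have hl : line.toList ≠ [] := by
    intro h
    apply hpre
    have h2 := congrArg String.ofList h
    rwa [String.ofList_toList] at h2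
  cases hcs : line.toList with
  | nil => exact absurd hcs hl
  | cons c cs =>
    rw [alt_eq line d c cs hcs]
    unfold get_column_markers
    rw [hcs]
    have hstep : goA d (c :: cs) 0 false false [] = (0 : Int) :: goB d (isDelim d c) cs 1 := by
      by_cases hc : isDelim d c = true <;>
        · rw [goA]
          simp only [hc, Bool.not_false, Bool.and_self, if_pos, List.nil_append]
          simpa [hc] using goA_eq_goB d cs (isDelim d c) 1 [(0 : Int)]
    simp [hstep]
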